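-- pv_equiv track=rewrite | github.com/mikewarot/Bitgrid_python | bitgrid/cli/reverse_graph_lutgrid.py | lut_uses_inputs
-- ===== SOURCE A (Python) =====
-- from typing import Dict, List, Tuple, Optional, Set
--
-- def lut_uses_inputs(lut_bits: int) -> List[bool]:
--     """Return a 4-length list indicating whether each variable (N,E,S,W) influences the LUT output.
--     LUT index encoding: idx = N | (E<<1) | (S<<2) | (W<<3)
--     """
--     uses = [False, False, False, False]
--     for var in range(4):
--         delta = 1 << var
--         for idx in range(16):
--             b0 = (lut_bits >> idx) & 1
--             b1 = (lut_bits >> (idx ^ delta)) & 1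
--             if b0 != b1:
--                 uses[var] = True
--                 break
--     return uses
-- ===== SOURCE B (Python) =====
-- def lut_uses_inputs(lut_bits: int):
--     v = lut_bits & 0xFFFF
--     return [bool((v ^ (v >> 1)) & 0x5555),
--             bool((v ^ (v >> 2)) & 0x3333),
--             bool((v ^ (v >> 4)) & 0x0F0F),
--             bool((v ^ (v >> 8)) & 0x00FF)]
-- ===== Notes on version B (the rewrite author's own statement) =====
-- stated objective: idiomatic
-- what changed: Replaces the nested per-variable bit-probing loops with four closed-form shift/xor/mask comparisons on the masked table value.
import Mathlib
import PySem

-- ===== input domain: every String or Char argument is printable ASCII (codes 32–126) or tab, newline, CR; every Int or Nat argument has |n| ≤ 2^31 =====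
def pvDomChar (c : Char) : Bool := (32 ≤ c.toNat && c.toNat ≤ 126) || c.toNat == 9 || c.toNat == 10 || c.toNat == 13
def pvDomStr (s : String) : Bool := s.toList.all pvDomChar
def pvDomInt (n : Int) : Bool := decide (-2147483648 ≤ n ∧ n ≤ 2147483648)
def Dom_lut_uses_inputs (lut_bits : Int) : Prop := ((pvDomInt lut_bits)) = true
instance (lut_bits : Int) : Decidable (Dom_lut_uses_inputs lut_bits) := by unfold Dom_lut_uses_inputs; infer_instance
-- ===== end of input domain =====

-- B replaces A's nested per-variable bit-probing loops by four closed-form shift/xor/mask tests on the masked 16-bit table (idiomatic bit-twiddling).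

-- ===== PORT A =====
-- (lut_bits >> i) & 1, exact: Python's arithmetic right shift is floor division by 2^i, and '& 1' of any int is floor-mod 2
def pvBit (lut_bits : Int) (i : Nat) : Int :=
  PySem.Int.mod (PySem.Int.floordiv lut_bits ((2:Int)^i)) 2

-- the inner 'for idx in range(16)' loop with its break: returns True at the first idx whose flipped partner differs
def pvInnerScan (lut_bits : Int) (delta : Nat) : List Nat → Bool
  | [] => false
  | idx :: rest =>
      if pvBit lut_bits idx ≠ pvBit lut_bits (idx ^^^ delta) then true
      else pvInnerScan lut_bits delta rest

def lut_uses_inputs (lut_bits : Int) : List Bool :=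
  (List.range 4).map (fun var => pvInnerScan lut_bits (1 <<< var) (List.range 16))

-- ===== PORT B =====
def lut_uses_inputs_alt (lut_bits : Int) : List Bool :=
  -- v = lut_bits & 0xFFFF: floor-mod by 2^16; result is nonnegative, so .toNat is exact
  let v : Nat := (PySem.Int.mod lut_bits 65536).toNat
  [decide ((v ^^^ (v >>> 1)) &&& 0x5555 ≠ 0),
   decide ((v ^^^ (v >>> 2)) &&& 0x3333 ≠ 0),
   decide ((v ^^^ (v >>> 4)) &&& 0x0F0F ≠ 0),
   decide ((v ^^^ (v >>> 8)) &&& 0x00FF ≠ 0)]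

-- ===== PRECONDITION & SPEC =====
def Spec_lut_uses_inputs (lut_bits : Int) (out : List Bool) : Prop := out = lut_uses_inputs_alt lut_bits
instance (lut_bits : Int) (out : List Bool) : Decidable (Spec_lut_uses_inputs lut_bits out) := by unfold Spec_lut_uses_inputs; infer_instance

-- ===== CLAIM (what is proved, stated in full; the proofs are below) =====
def Claim_equal_lut_uses_inputs : Prop := ∀ (lut_bits : Int), Dom_lut_uses_inputs lut_bits → Spec_lut_uses_inputs lut_bits (lut_uses_inputs lut_bits)

-- ===== LEMMAS AND PROOFS =====

-- Nat-level mirror of A's inner scan, and its bit at position i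
def bitN (v i : Nat) : Nat := v / 2^i % 2
def innerN (v delta : Nat) : List Nat → Bool
  | [] => false
  | idx :: rest => if bitN v idx ≠ bitN v (idx ^^^ delta) then true else innerN v delta rest
def auxA (v : Nat) : List Bool := (List.range 4).map (fun var => innerN v (1 <<< var) (List.range 16))
def auxB (v : Nat) : List Bool :=
  [decide ((v ^^^ (v >>> 1)) &&& 0x5555 ≠ 0),
   decide ((v ^^^ (v >>> 2)) &&& 0x3333 ≠ 0),
   decide ((v ^^^ (v >>> 4)) &&& 0x0F0F ≠ 0),
   decide ((v ^^^ (v >>> 8)) &&& 0x00FF ≠ 0)]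

theorem testBit_char (v k : Nat) : v.testBit k = decide (bitN v k = 1) := by
  simp [Nat.testBit, Nat.shiftRight_eq_div_pow, bitN]
  rcases Nat.decEq (v / 2^k % 2) 1 with h | h <;> simp [h]

theorem bitN_ne_iff (v i j : Nat) : (bitN v i ≠ bitN v j) ↔ (v.testBit i ≠ v.testBit j) := by
  rcases Nat.mod_two_eq_zero_or_one (v / 2^i) with h1 | h1 <;>
  rcases Nat.mod_two_eq_zero_or_one (v / 2^j) with h2 | h2 <;>
    simp [testBit_char, bitN, h1, h2]

theorem xor_true_iff : ∀ (a b : Bool), ((a ^^ b) = true) ↔ a ≠ b := by decide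

theorem Q_of_bit (v delta mask i : Nat) (hm : mask.testBit i = true)
    (hne : v.testBit i ≠ v.testBit (delta + i)) : ((v ^^^ (v >>> delta)) &&& mask) ≠ 0 := by
  intro h0
  have hb : ((v ^^^ (v >>> delta)) &&& mask).testBit i = true := by
    rw [Nat.testBit_land, Nat.testBit_xor, Nat.testBit_shiftRight, hm, Bool.and_true, xor_true_iff]
    exact hne
  rw [h0, Nat.zero_testBit] at hb
  exact Bool.false_ne_true hb

theorem mask_lt (mask : Nat) (h : mask < 65536) (i : Nat) (hm : mask.testBit i = true) : i < 16 := by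
  by_contra hge
  have hge' : 16 ≤ i := by omega
  have : mask < 2^i := lt_of_lt_of_le h (by calc (65536:Nat) = 2^16 := by norm_num
                                               _ ≤ 2^i := Nat.pow_le_pow_right (by norm_num) hge')
  rw [Nat.testBit_eq_false_of_lt this] at hm
  exact Bool.false_ne_true hm

theorem pair_equiv_1 (v : Nat) :
    (∃ idx, idx < 16 ∧ v.testBit idx ≠ v.testBit (idx ^^^ 1)) ↔ ((v ^^^ (v >>> 1)) &&& 21845) ≠ 0 := by
  constructor
  · rintro ⟨idx, h16, hne⟩
    interval_cases idx
    · exact Q_of_bit v 1 21845 0 (by decide) hne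
    · exact Q_of_bit v 1 21845 0 (by decide) hne.symm
    · exact Q_of_bit v 1 21845 2 (by decide) hne
    · exact Q_of_bit v 1 21845 2 (by decide) hne.symm
    · exact Q_of_bit v 1 21845 4 (by decide) hne
    · exact Q_of_bit v 1 21845 4 (by decide) hne.symm
    · exact Q_of_bit v 1 21845 6 (by decide) hne
    · exact Q_of_bit v 1 21845 6 (by decide) hne.symm
    · exact Q_of_bit v 1 21845 8 (by decide) hne
    · exact Q_of_bit v 1 21845 8 (by decide) hne.symm
    · exact Q_of_bit v 1 21845 10 (by decide) hne
    · exact Q_of_bit v 1 21845 10 (by decide) hne.symm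
    · exact Q_of_bit v 1 21845 12 (by decide) hne
    · exact Q_of_bit v 1 21845 12 (by decide) hne.symm
    · exact Q_of_bit v 1 21845 14 (by decide) hne
    · exact Q_of_bit v 1 21845 14 (by decide) hne.symm
  · intro hQ
    rcases Nat.exists_testBit_of_ne_zero hQ with ⟨i, hb⟩
    rw [Nat.testBit_land, Nat.testBit_xor, Nat.testBit_shiftRight, Bool.and_eq_true] at hb
    have hmask : Nat.testBit 21845 i = true := hb.2
    have hx : v.testBit i ≠ v.testBit (1 + i) := (xor_true_iff _ _).mp hb.1
    have hi16 : i < 16 := mask_lt 21845 (by norm_num) i hmask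
    interval_cases i
    · exact ⟨0, by omega, hx⟩
    · exact absurd hmask (by decide)
    · exact ⟨2, by omega, hx⟩
    · exact absurd hmask (by decide)
    · exact ⟨4, by omega, hx⟩
    · exact absurd hmask (by decide)
    · exact ⟨6, by omega, hx⟩
    · exact absurd hmask (by decide)
    · exact ⟨8, by omega, hx⟩
    · exact absurd hmask (by decide)
    · exact ⟨10, by omega, hx⟩
    · exact absurd hmask (by decide)
    · exact ⟨12, by omega, hx⟩
    · exact absurd hmask (by decide)
    · exact ⟨14, by omega, hx⟩
    · exact absurd hmask (by decide)

theorem pair_equiv_2 (v : Nat) :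
    (∃ idx, idx < 16 ∧ v.testBit idx ≠ v.testBit (idx ^^^ 2)) ↔ ((v ^^^ (v >>> 2)) &&& 13107) ≠ 0 := by
  constructor
  · rintro ⟨idx, h16, hne⟩
    interval_cases idx
    · exact Q_of_bit v 2 13107 0 (by decide) hne
    · exact Q_of_bit v 2 13107 1 (by decide) hne
    · exact Q_of_bit v 2 13107 0 (by decide) hne.symm
    · exact Q_of_bit v 2 13107 1 (by decide) hne.symm
    · exact Q_of_bit v 2 13107 4 (by decide) hne
    · exact Q_of_bit v 2 13107 5 (by decide) hne
    · exact Q_of_bit v 2 13107 4 (by decide) hne.symm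
    · exact Q_of_bit v 2 13107 5 (by decide) hne.symm
    · exact Q_of_bit v 2 13107 8 (by decide) hne
    · exact Q_of_bit v 2 13107 9 (by decide) hne
    · exact Q_of_bit v 2 13107 8 (by decide) hne.symm
    · exact Q_of_bit v 2 13107 9 (by decide) hne.symm
    · exact Q_of_bit v 2 13107 12 (by decide) hne
    · exact Q_of_bit v 2 13107 13 (by decide) hne
    · exact Q_of_bit v 2 13107 12 (by decide) hne.symm
    · exact Q_of_bit v 2 13107 13 (by decide) hne.symm
  · intro hQ
    rcases Nat.exists_testBit_of_ne_zero hQ with ⟨i, hb⟩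
    rw [Nat.testBit_land, Nat.testBit_xor, Nat.testBit_shiftRight, Bool.and_eq_true] at hb
    have hmask : Nat.testBit 13107 i = true := hb.2
    have hx : v.testBit i ≠ v.testBit (2 + i) := (xor_true_iff _ _).mp hb.1
    have hi16 : i < 16 := mask_lt 13107 (by norm_num) i hmask
    interval_cases i
    · exact ⟨0, by omega, hx⟩
    · exact ⟨1, by omega, hx⟩
    · exact absurd hmask (by decide)
    · exact absurd hmask (by decide)
    · exact ⟨4, by omega, hx⟩
    · exact ⟨5, by omega, hx⟩
    · exact absurd hmask (by decide)
    · exact absurd hmask (by decide)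
    · exact ⟨8, by omega, hx⟩
    · exact ⟨9, by omega, hx⟩
    · exact absurd hmask (by decide)
    · exact absurd hmask (by decide)
    · exact ⟨12, by omega, hx⟩
    · exact ⟨13, by omega, hx⟩
    · exact absurd hmask (by decide)
    · exact absurd hmask (by decide)

theorem pair_equiv_4 (v : Nat) :
    (∃ idx, idx < 16 ∧ v.testBit idx ≠ v.testBit (idx ^^^ 4)) ↔ ((v ^^^ (v >>> 4)) &&& 3855) ≠ 0 := by
  constructor
  · rintro ⟨idx, h16, hne⟩
    interval_cases idx
    · exact Q_of_bit v 4 3855 0 (by decide) hne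
    · exact Q_of_bit v 4 3855 1 (by decide) hne
    · exact Q_of_bit v 4 3855 2 (by decide) hne
    · exact Q_of_bit v 4 3855 3 (by decide) hne
    · exact Q_of_bit v 4 3855 0 (by decide) hne.symm
    · exact Q_of_bit v 4 3855 1 (by decide) hne.symm
    · exact Q_of_bit v 4 3855 2 (by decide) hne.symm
    · exact Q_of_bit v 4 3855 3 (by decide) hne.symm
    · exact Q_of_bit v 4 3855 8 (by decide) hne
    · exact Q_of_bit v 4 3855 9 (by decide) hne
    · exact Q_of_bit v 4 3855 10 (by decide) hne
    · exact Q_of_bit v 4 3855 11 (by decide) hne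
    · exact Q_of_bit v 4 3855 8 (by decide) hne.symm
    · exact Q_of_bit v 4 3855 9 (by decide) hne.symm
    · exact Q_of_bit v 4 3855 10 (by decide) hne.symm
    · exact Q_of_bit v 4 3855 11 (by decide) hne.symm
  · intro hQ
    rcases Nat.exists_testBit_of_ne_zero hQ with ⟨i, hb⟩
    rw [Nat.testBit_land, Nat.testBit_xor, Nat.testBit_shiftRight, Bool.and_eq_true] at hb
    have hmask : Nat.testBit 3855 i = true := hb.2
    have hx : v.testBit i ≠ v.testBit (4 + i) := (xor_true_iff _ _).mp hb.1
    have hi16 : i < 16 := mask_lt 3855 (by norm_num) i hmask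
    interval_cases i
    · exact ⟨0, by omega, hx⟩
    · exact ⟨1, by omega, hx⟩
    · exact ⟨2, by omega, hx⟩
    · exact ⟨3, by omega, hx⟩
    · exact absurd hmask (by decide)
    · exact absurd hmask (by decide)
    · exact absurd hmask (by decide)
    · exact absurd hmask (by decide)
    · exact ⟨8, by omega, hx⟩
    · exact ⟨9, by omega, hx⟩
    · exact ⟨10, by omega, hx⟩
    · exact ⟨11, by omega, hx⟩
    · exact absurd hmask (by decide)
    · exact absurd hmask (by decide)
    · exact absurd hmask (by decide)
    · exact absurd hmask (by decide)

theorem pair_equiv_8 (v : Nat) :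
    (∃ idx, idx < 16 ∧ v.testBit idx ≠ v.testBit (idx ^^^ 8)) ↔ ((v ^^^ (v >>> 8)) &&& 255) ≠ 0 := by
  constructor
  · rintro ⟨idx, h16, hne⟩
    interval_cases idx
    · exact Q_of_bit v 8 255 0 (by decide) hne
    · exact Q_of_bit v 8 255 1 (by decide) hne
    · exact Q_of_bit v 8 255 2 (by decide) hne
    · exact Q_of_bit v 8 255 3 (by decide) hne
    · exact Q_of_bit v 8 255 4 (by decide) hne
    · exact Q_of_bit v 8 255 5 (by decide) hne
    · exact Q_of_bit v 8 255 6 (by decide) hne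
    · exact Q_of_bit v 8 255 7 (by decide) hne
    · exact Q_of_bit v 8 255 0 (by decide) hne.symm
    · exact Q_of_bit v 8 255 1 (by decide) hne.symm
    · exact Q_of_bit v 8 255 2 (by decide) hne.symm
    · exact Q_of_bit v 8 255 3 (by decide) hne.symm
    · exact Q_of_bit v 8 255 4 (by decide) hne.symm
    · exact Q_of_bit v 8 255 5 (by decide) hne.symm
    · exact Q_of_bit v 8 255 6 (by decide) hne.symm
    · exact Q_of_bit v 8 255 7 (by decide) hne.symm
  · intro hQ
    rcases Nat.exists_testBit_of_ne_zero hQ with ⟨i, hb⟩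
    rw [Nat.testBit_land, Nat.testBit_xor, Nat.testBit_shiftRight, Bool.and_eq_true] at hb
    have hmask : Nat.testBit 255 i = true := hb.2
    have hx : v.testBit i ≠ v.testBit (8 + i) := (xor_true_iff _ _).mp hb.1
    have hi16 : i < 16 := mask_lt 255 (by norm_num) i hmask
    interval_cases i
    · exact ⟨0, by omega, hx⟩
    · exact ⟨1, by omega, hx⟩
    · exact ⟨2, by omega, hx⟩
    · exact ⟨3, by omega, hx⟩
    · exact ⟨4, by omega, hx⟩
    · exact ⟨5, by omega, hx⟩
    · exact ⟨6, by omega, hx⟩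
    · exact ⟨7, by omega, hx⟩
    · exact absurd hmask (by decide)
    · exact absurd hmask (by decide)
    · exact absurd hmask (by decide)
    · exact absurd hmask (by decide)
    · exact absurd hmask (by decide)
    · exact absurd hmask (by decide)
    · exact absurd hmask (by decide)
    · exact absurd hmask (by decide)

theorem innerN_any (v d : Nat) (L : List Nat) :
    innerN v d L = L.any (fun idx => bitN v idx != bitN v (idx ^^^ d)) := by
  induction L with
  | nil => rfl
  | cons a L ih =>
      by_cases h : bitN v a = bitN v (a ^^^ d) <;> simp [innerN, h, ih, bne_iff_ne]

theorem innerN_eq_true (v d : Nat) :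
    (innerN v d (List.range 16) = true) ↔ (∃ idx, idx < 16 ∧ v.testBit idx ≠ v.testBit (idx ^^^ d)) := by
  rw [innerN_any, List.any_eq_true]
  constructor
  · rintro ⟨idx, hmem, hbe⟩
    exact ⟨idx, List.mem_range.mp hmem, (bitN_ne_iff ..).mp (bne_iff_ne.mp hbe)⟩
  · rintro ⟨idx, h16, hne⟩
    exact ⟨idx, List.mem_range.mpr h16, bne_iff_ne.mpr ((bitN_ne_iff ..).mpr hne)⟩

theorem comp_eq (v d m : Nat)
    (h : (∃ idx, idx < 16 ∧ v.testBit idx ≠ v.testBit (idx ^^^ d)) ↔ ((v ^^^ (v >>> d)) &&& m) ≠ 0) :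
    innerN v d (List.range 16) = decide (((v ^^^ (v >>> d)) &&& m) ≠ 0) := by
  rw [Bool.eq_iff_iff, innerN_eq_true, decide_eq_true_iff]
  exact h

-- the heart: A's per-variable scan equals B's mask test, for every Nat
theorem auxAB (v : Nat) : auxA v = auxB v := by
  unfold auxA auxB
  simp only [show List.range 4 = [0,1,2,3] from rfl, List.map_cons, List.map_nil]
  rw [show (1 <<< 0) = 1 from rfl, show (1 <<< 1) = 2 from rfl,
      show (1 <<< 2) = 4 from rfl, show (1 <<< 3) = 8 from rfl,
      comp_eq v 1 21845 (pair_equiv_1 v), comp_eq v 2 13107 (pair_equiv_2 v),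
      comp_eq v 4 3855 (pair_equiv_4 v), comp_eq v 8 255 (pair_equiv_8 v)]

-- bit i < 16 of x equals bit i of x mod 2^16
theorem pvBit_mod (x : Int) (i : Nat) (h : i < 16) :
    pvBit x i = pvBit (PySem.Int.mod x 65536) i := by
  unfold pvBit
  rw [PySem.Int.mod_eq_emod_of_pos (a:=x) (by norm_num),
      PySem.Int.mod_eq_emod_of_pos (show (0:Int) < 2 by norm_num),
      PySem.Int.mod_eq_emod_of_pos (show (0:Int) < 2 by norm_num),
      PySem.Int.floordiv_eq_ediv_of_pos (by positivity),
      PySem.Int.floordiv_eq_ediv_of_pos (by positivity)]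
  interval_cases i <;> norm_num <;> omega

theorem pvInnerScan_mod (x : Int) (delta : Nat) (L : List Nat)
    (hL : ∀ idx ∈ L, idx < 16 ∧ idx ^^^ delta < 16) :
    pvInnerScan x delta L = pvInnerScan (PySem.Int.mod x 65536) delta L := by
  induction L with
  | nil => rfl
  | cons idx rest ih =>
      have h := hL idx (by simp)
      simp only [pvInnerScan, pvBit_mod x idx h.1, pvBit_mod x (idx ^^^ delta) h.2]
      split_ifs <;> [rfl; exact ih (fun i hi => hL i (by simp [hi]))]

theorem lut_mod (x : Int) :
    lut_uses_inputs x = lut_uses_inputs (PySem.Int.mod x 65536) := by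
  unfold lut_uses_inputs
  refine List.map_congr_left (fun var hvar => ?_)
  refine pvInnerScan_mod x _ _ (fun idx hidx => ?_)
  have hv : var < 4 := by simpa using hvar
  have hi : idx < 16 := by simpa using hidx
  interval_cases var <;> interval_cases idx <;> decide

theorem mod_idem (x : Int) :
    PySem.Int.mod (PySem.Int.mod x 65536) 65536 = PySem.Int.mod x 65536 := by
  rw [PySem.Int.mod_eq_emod_of_pos (a:=x) (by norm_num),
      PySem.Int.mod_eq_emod_of_pos (by norm_num)]
  exact Int.emod_emod_of_dvd x dvd_rfl

theorem alt_mod (x : Int) :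
    lut_uses_inputs_alt (PySem.Int.mod x 65536) = lut_uses_inputs_alt x := by
  unfold lut_uses_inputs_alt
  rw [mod_idem]

theorem pvBit_cast (v : Nat) (i : Nat) : pvBit (v : Int) i = (bitN v i : Int) := by
  unfold pvBit bitN
  rw [show ((2:Int)^i) = ((2^i : Nat) : Int) by push_cast; ring,
      PySem.Int.floordiv_natCast, show (2:Int) = ((2:Nat) : Int) by norm_num,
      PySem.Int.mod_natCast]

theorem pvInnerScan_cast (v delta : Nat) (L : List Nat) :
    pvInnerScan (v : Int) delta L = innerN v delta L := by
  induction L with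
  | nil => rfl
  | cons idx rest ih =>
      simp only [pvInnerScan, innerN, pvBit_cast, ne_eq, Int.natCast_inj, ih]

theorem portA_cast (v : Nat) : lut_uses_inputs (v : Int) = auxA v := by
  unfold lut_uses_inputs auxA
  simp only [pvInnerScan_cast]

theorem portB_cast (v : Nat) (h : v < 65536) : lut_uses_inputs_alt (v : Int) = auxB v := by
  unfold lut_uses_inputs_alt auxB
  rw [show (65536:Int) = ((65536:Nat) : Int) by norm_num, PySem.Int.mod_natCast,
      Int.toNat_natCast, Nat.mod_eq_of_lt h]

-- ===== VERDICT (by name: the statement is the Claim_ definition above) =====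
theorem lut_uses_inputs_spec : Claim_equal_lut_uses_inputs := by
  intro x _
  unfold Spec_lut_uses_inputs
  have hpos : (0:Int) < 65536 := by norm_num
  have h0 : 0 ≤ PySem.Int.mod x 65536 := by
    rw [PySem.Int.mod_eq_emod_of_pos (a:=x) hpos]; exact Int.emod_nonneg x (by norm_num)
  have hlt : PySem.Int.mod x 65536 < 65536 := by
    rw [PySem.Int.mod_eq_emod_of_pos (a:=x) hpos]; exact Int.emod_lt_of_pos x hpos
  set v : Int := PySem.Int.mod x 65536 with hv
  have hvn : v = ((v.toNat : Nat) : Int) := (Int.toNat_of_nonneg h0).symm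
  have hfin : (v.toNat : Nat) < 65536 := by omega
  calc lut_uses_inputs x = lut_uses_inputs v := lut_mod x
    _ = auxA v.toNat := by rw [hvn]; exact portA_cast v.toNat
    _ = auxB v.toNat := auxAB v.toNat
    _ = lut_uses_inputs_alt v := by rw [hvn]; exact (portB_cast v.toNat hfin).symm
    _ = lut_uses_inputs_alt x := alt_mod x
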